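-- pv_equiv track=rewrite | github.com/michellehma/access-control-benchmark | driver.py | separateConditions
-- ===== SOURCE A (Python) =====
-- def separateConditions(conditions):
--     separatedCondition = []
--     s = []
--     p = []
--     ps = []
--     c = []
--     o = []
--     l = []
--     n = []
--     r = []
--     for column in conditions:
--         splitPer = column.split("_")
--         if splitPer[0] == 's':
--             s.append(column)
--         elif splitPer[0] == 'p':
--             p.append(column)
--         elif splitPer[0] == 'ps':
--             ps.append(column)
--         elif splitPer[0] == 'c':
--             c.append(column)
--         elif splitPer[0] == 'o':
--             o.append(column)
--         elif splitPer[0] == 'l':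
--             l.append(column)
--         elif splitPer[0] == 'n':
--             n.append(column)
--         elif splitPer[0] == 'r':
--             r.append(column)
--     if s:
--         separatedCondition.append(s)
--     if p:
--         separatedCondition.append(p)
--     if ps:
--         separatedCondition.append(ps)
--     if c:
--         separatedCondition.append(c)
--     if o:
--         separatedCondition.append(o)
--     if l:
--         separatedCondition.append(l)
--     if n:
--         separatedCondition.append(n)
--     if r:
--         separatedCondition.append(r)
--     return separatedCondition
-- ===== SOURCE B (Python) =====
-- def separateConditions(conditions):
--     def bucket(key):
--         return [column for column in conditions if column.split('_')[0] == key]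
--     return [g for g in map(bucket, ['s', 'p', 'ps', 'c', 'o', 'l', 'n', 'r']) if g]
-- ===== Notes on version B (the rewrite author's own statement) =====
-- stated objective: alternative
-- what changed: Inverts the traversal: instead of one pass over conditions dispatching into eight accumulator lists via if/elif and then eight conditional appends, B loops over the fixed key order and for each key filters the whole condition list for that prefix, keeping non-empty groups; no accumulators or dispatch remain.
import Mathlib
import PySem

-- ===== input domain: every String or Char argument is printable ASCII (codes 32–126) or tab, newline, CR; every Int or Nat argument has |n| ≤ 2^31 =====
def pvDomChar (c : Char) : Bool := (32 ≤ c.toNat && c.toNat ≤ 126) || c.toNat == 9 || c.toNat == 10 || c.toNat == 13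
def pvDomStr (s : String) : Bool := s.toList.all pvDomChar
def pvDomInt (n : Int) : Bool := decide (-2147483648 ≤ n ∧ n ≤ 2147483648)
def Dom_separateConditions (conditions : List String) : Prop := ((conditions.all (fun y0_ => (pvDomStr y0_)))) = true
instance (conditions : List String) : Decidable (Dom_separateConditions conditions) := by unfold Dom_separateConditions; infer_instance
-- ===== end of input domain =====

-- B inverts the traversal: instead of one pass dispatching into eight accumulators,
-- it filters the condition list once per key in the fixed key order (objective: alternative).

-- ===== PORT A =====
-- state: the eight accumulator lists (s, p, ps, c, o, l, n, r)
def pvStateA := List String × List String × List String × List String ×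
                List String × List String × List String × List String

-- column.split("_")[0], as both Pythons compute it; split with a nonempty
-- separator never returns an empty list (Python returns [""] on ""), so index 0
-- is always in range and the defaults of getD/pyGetD are never used — exact.
def pvSplitHead (column : String) : String :=
  PySem.List.pyGetD ((PySem.Str.split? column "_").getD []) 0 ""

def pvStepA (st : pvStateA) (column : String) : pvStateA :=
  match st with
  | (s, p, ps, c, o, l, n, r) =>
    if pvSplitHead column = "s" then (s ++ [column], p, ps, c, o, l, n, r)
    else if pvSplitHead column = "p" then (s, p ++ [column], ps, c, o, l, n, r)
    else if pvSplitHead column = "ps" then (s, p, ps ++ [column], c, o, l, n, r)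
    else if pvSplitHead column = "c" then (s, p, ps, c ++ [column], o, l, n, r)
    else if pvSplitHead column = "o" then (s, p, ps, c, o ++ [column], l, n, r)
    else if pvSplitHead column = "l" then (s, p, ps, c, o, l ++ [column], n, r)
    else if pvSplitHead column = "n" then (s, p, ps, c, o, l, n ++ [column], r)
    else if pvSplitHead column = "r" then (s, p, ps, c, o, l, n, r ++ [column])
    else (s, p, ps, c, o, l, n, r)

def separateConditions (conditions : List String) : List (List String) :=
  match conditions.foldl pvStepA ([], [], [], [], [], [], [], []) with
  | (s, p, ps, c, o, l, n, r) =>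
    let r0 : List (List String) := []
    let r1 := if s.isEmpty then r0 else r0 ++ [s]
    let r2 := if p.isEmpty then r1 else r1 ++ [p]
    let r3 := if ps.isEmpty then r2 else r2 ++ [ps]
    let r4 := if c.isEmpty then r3 else r3 ++ [c]
    let r5 := if o.isEmpty then r4 else r4 ++ [o]
    let r6 := if l.isEmpty then r5 else r5 ++ [l]
    let r7 := if n.isEmpty then r6 else r6 ++ [n]
    let r8 := if r.isEmpty then r7 else r7 ++ [r]
    r8

-- ===== PORT B =====
def pvOrder : List String := ["s", "p", "ps", "c", "o", "l", "n", "r"]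

-- bucket(key) = [column for column in conditions if column.split('_')[0] == key]
def pvBucket (conditions : List String) (key : String) : List String :=
  conditions.filter (fun column => pvSplitHead column = key)

def separateConditions_alt (conditions : List String) : List (List String) :=
  (pvOrder.map (pvBucket conditions)).filter (fun g => !g.isEmpty)

-- ===== PRECONDITION & SPEC =====
def Spec_separateConditions (conditions : List String) (out : List (List String)) : Prop := out = separateConditions_alt conditions
instance (conditions : List String) (out : List (List String)) : Decidable (Spec_separateConditions conditions out) := by unfold Spec_separateConditions; infer_instance

-- ===== CLAIM (what is proved, stated in full; the proofs are below) =====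
def Claim_equal_separateConditions : Prop := ∀ (conditions : List String), Dom_separateConditions conditions → Spec_separateConditions conditions (separateConditions conditions)

-- ===== LEMMAS AND PROOFS =====

-- invariant: A's fold extends each accumulator by the corresponding filter of the remaining input
theorem pvFoldA_filter (conditions : List String) (st : pvStateA) :
    conditions.foldl pvStepA st =
      match st with
      | (s, p, ps, c, o, l, n, r) =>
        (s ++ pvBucket conditions "s", p ++ pvBucket conditions "p",
         ps ++ pvBucket conditions "ps", c ++ pvBucket conditions "c",
         o ++ pvBucket conditions "o", l ++ pvBucket conditions "l",
         n ++ pvBucket conditions "n", r ++ pvBucket conditions "r") := by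
  induction conditions generalizing st with
  | nil => obtain ⟨s, p, ps, c, o, l, n, r⟩ := st; simp [pvBucket]
  | cons x xs ih =>
    obtain ⟨s, p, ps, c, o, l, n, r⟩ := st
    rw [List.foldl_cons, ih]
    unfold pvStepA
    by_cases h1 : pvSplitHead x = "s"
    · simp [pvBucket, h1]
    by_cases h2 : pvSplitHead x = "p"
    · simp [pvBucket, h2]
    by_cases h3 : pvSplitHead x = "ps"
    · simp [pvBucket, h3]
    by_cases h4 : pvSplitHead x = "c"
    · simp [pvBucket, h4]
    by_cases h5 : pvSplitHead x = "o"
    · simp [pvBucket, h5]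
    by_cases h6 : pvSplitHead x = "l"
    · simp [pvBucket, h6]
    by_cases h7 : pvSplitHead x = "n"
    · simp [pvBucket, h7]
    by_cases h8 : pvSplitHead x = "r"
    · simp [pvBucket, h8]
    · simp [pvBucket, h1, h2, h3, h4, h5, h6, h7, h8]

theorem pvEmitStep (acc : List (List String)) (x : List String) :
    (if x.isEmpty then acc else acc ++ [x]) =
      acc ++ List.filter (fun g => !g.isEmpty) [x] := by
  cases x <;> simp

theorem separateConditions_spec' (conditions : List String) :
    separateConditions conditions = separateConditions_alt conditions := by
  unfold separateConditions separateConditions_alt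
  rw [pvFoldA_filter]
  simp only [pvOrder, List.map]
  generalize pvBucket conditions "s" = s
  generalize pvBucket conditions "p" = p
  generalize pvBucket conditions "ps" = ps
  generalize pvBucket conditions "c" = c
  generalize pvBucket conditions "o" = o
  generalize pvBucket conditions "l" = l
  generalize pvBucket conditions "n" = n
  generalize pvBucket conditions "r" = r
  simp only [pvEmitStep]
  show _ = List.filter _ ([s] ++ [p] ++ [ps] ++ [c] ++ [o] ++ [l] ++ [n] ++ [r])
  simp only [List.filter_append, List.append_assoc, List.nil_append]

-- ===== VERDICT (by name: the statement is the Claim_ definition above) =====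
theorem separateConditions_spec : Claim_equal_separateConditions := by
  intro conditions _
  unfold Spec_separateConditions
  exact separateConditions_spec' conditions
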